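-- pv_equiv track=rewrite | github.com/fank-cd/python_leetcode | Problemset/nGK0Fy/nGK0Fy.py | calculate
-- ===== SOURCE A (Python) =====
-- def calculate(s: str) -> int:
--     x,y = 1,0
--     for i in s:
--         if i == "A":
--             x = 2 * x + y
--         elif i == "B":
--             y = 2 * y + x
--
--     return x+y
-- ===== SOURCE B (Python) =====
-- def calculate(s: str) -> int:
--     # Each 'A' or 'B' doubles x+y; other characters leave it unchanged,
--     # so the result is a closed form: 2 ** (number of 'A'/'B' characters).
--     return 2 ** sum(1 for c in s if c == "A" or c == "B")
-- ===== Notes on version B (the rewrite author's own statement) =====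
-- stated objective: simpler
-- what changed: Replaces the coupled (x,y) state recurrence with the closed form 2**count of 'A'/'B' characters, since each such character exactly doubles x+y.
import Mathlib
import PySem

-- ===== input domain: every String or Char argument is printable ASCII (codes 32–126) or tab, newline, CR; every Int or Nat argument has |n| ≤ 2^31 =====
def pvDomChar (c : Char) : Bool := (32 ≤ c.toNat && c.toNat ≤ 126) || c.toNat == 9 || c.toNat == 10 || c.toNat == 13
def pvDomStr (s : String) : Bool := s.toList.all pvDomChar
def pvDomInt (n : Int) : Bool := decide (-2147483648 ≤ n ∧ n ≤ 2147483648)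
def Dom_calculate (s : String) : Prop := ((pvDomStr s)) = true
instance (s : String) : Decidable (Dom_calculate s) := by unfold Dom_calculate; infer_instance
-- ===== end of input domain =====

-- B replaces A's coupled (x,y) recurrence by the closed form 2^(count of 'A'/'B'); objective: simpler.

-- ===== PORT A =====
def calculate (s : String) : Int :=
  let p := s.toList.foldl
    (fun (xy : Int × Int) i =>
      if i = 'A' then (2 * xy.1 + xy.2, xy.2)
      else if i = 'B' then (xy.1, 2 * xy.2 + xy.1)
      else xy)
    (1, 0)
  p.1 + p.2

-- ===== PORT B =====
def calculate_alt (s : String) : Int :=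
  2 ^ (s.toList.countP (fun c => c = 'A' || c = 'B'))

-- ===== PRECONDITION & SPEC =====
def Spec_calculate (s : String) (out : Int) : Prop := out = calculate_alt s
instance (s : String) (out : Int) : Decidable (Spec_calculate s out) := by unfold Spec_calculate; infer_instance

-- ===== CLAIM (what is proved, stated in full; the proofs are below) =====
def Claim_equal_calculate : Prop := ∀ (s : String), Dom_calculate s → Spec_calculate s (calculate s)

-- ===== LEMMAS AND PROOFS =====

def pvStep (xy : Int × Int) (i : Char) : Int × Int :=
  if i = 'A' then (2 * xy.1 + xy.2, xy.2)
  else if i = 'B' then (xy.1, 2 * xy.2 + xy.1)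
  else xy

-- invariant: after the fold, x+y = (x₀+y₀)·2^(count of 'A'/'B')
theorem pvFold_sum (l : List Char) : ∀ (x y : Int),
    (l.foldl pvStep (x, y)).1 + (l.foldl pvStep (x, y)).2
      = (x + y) * 2 ^ (l.countP (fun c => c = 'A' || c = 'B')) := by
  induction l with
  | nil => intro x y; simp
  | cons c t ih =>
    intro x y
    by_cases hA : c = 'A'
    · simp [pvStep, hA, List.countP_cons, ih, pow_succ]; ring
    · by_cases hB : c = 'B'
      · simp [pvStep, hA, hB, ih, pow_succ]; ring
      · simp [pvStep, hA, hB, List.countP_cons, ih]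

-- ===== VERDICT (by name: the statement is the Claim_ definition above) =====
theorem calculate_spec : Claim_equal_calculate := by
  intro s _
  unfold Spec_calculate calculate calculate_alt
  have h := pvFold_sum s.toList 1 0
  simpa [pvStep] using h
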